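-- pv_equiv track=rewrite | github.com/vduseev/number-encoding | encoding_scheme_builder/encoding_scheme_builder.py | _map_words_to_numbers
-- ===== SOURCE A (Python) =====
-- def remove_characters(string, chars):
--     result = string
--     for char in chars:
--         result = result.replace(char, '')
--     return result
--
-- def _map_words_to_numbers(words, char_to_digit_mapping, ignored_chars):
--     """Build a dict with encodings as keys and list of words having such
--     encoding as values.
--
--     Key     - is a string of digits encoded according to mapping dict.
--     Value   - is a list [] of all words from encoding_scheme_builder file that
--               are encoded by such string.
--
--     :param words: list of all words from encoding_scheme_builder file
--     :return: encoding encoding_scheme_builder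
--     """
--
--     # Encoded encoding_scheme_builder with encoding as a key and a list of associated
--     # words as a value.
--     mapping = {}
--
--     # For each word calculate the encoded value
--     for word in words:
--         word_encoding = _encode_word_with_char_to_digit_mapping(
--             word=word,
--             mapping=char_to_digit_mapping,
--             ignored_chars=ignored_chars
--         )
--
--         # Check if some word already produced same encoding.
--         if word_encoding in mapping:
--             # If yes, add the current word as an additional encoding option.
--             mapping[word_encoding].add(word)
--         else:
--             # If no, add a new key with the current word as the first list
--             # value.
--             mapping[word_encoding] = {word}
--
--     return mapping
--
-- def _encode_word_with_char_to_digit_mapping(word, mapping, ignored_chars):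
--     """Represent given word as a string of digits according to the mapping
--     given in the requirements.
--
--     The words in the encoding_scheme_builder contain letters
--     (capital or small, but the difference is ignored in the sorting), dashes
--     - and double quotes " . For the encoding only the letters are used.
--
--     :param word:
--     :param mapping:
--     :return: String of digits representing given word
--     """
--
--     # remove umlaut symbol (represented by double quotes) and dashes
--     clean_word = remove_characters(word, ignored_chars)
--
--     encoding = ''
--     for char in clean_word:
--         encoding += mapping[char]
--
--     return encoding
-- ===== SOURCE B (Python) =====
-- def _map_words_to_numbers(words, char_to_digit_mapping, ignored_chars):
--     """Group words by their digit encodings.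
--
--     Phase 1 encodes every word in a single comprehension, dropping ignored
--     characters with a filter and assembling the digit string with one join.
--     Phase 2 groups the resulting (encoding, word) pairs with setdefault.
--     """
--     ignored = set(ignored_chars)
--     pairs = [(''.join(char_to_digit_mapping[c] for c in word if c not in ignored), word)
--              for word in words]
--     groups = {}
--     for encoding, word in pairs:
--         groups.setdefault(encoding, set()).add(word)
--     return groups
-- ===== Notes on version B (the rewrite author's own statement) =====
-- stated objective: faster
-- what changed: A cleans each word with one full str.replace pass per ignored character and grows the encoding by character-wise '+=' concatenation before an if/in-else dict update; B encodes every word in one map phase (a single filter pass plus one ''.join per word) and then groups the (encoding, word) pairs in a separate pass with setdefault. Pre_ excludes only the inputs where A raises KeyError (a kept character missing from char_to_digit_mapping).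
import Mathlib
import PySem

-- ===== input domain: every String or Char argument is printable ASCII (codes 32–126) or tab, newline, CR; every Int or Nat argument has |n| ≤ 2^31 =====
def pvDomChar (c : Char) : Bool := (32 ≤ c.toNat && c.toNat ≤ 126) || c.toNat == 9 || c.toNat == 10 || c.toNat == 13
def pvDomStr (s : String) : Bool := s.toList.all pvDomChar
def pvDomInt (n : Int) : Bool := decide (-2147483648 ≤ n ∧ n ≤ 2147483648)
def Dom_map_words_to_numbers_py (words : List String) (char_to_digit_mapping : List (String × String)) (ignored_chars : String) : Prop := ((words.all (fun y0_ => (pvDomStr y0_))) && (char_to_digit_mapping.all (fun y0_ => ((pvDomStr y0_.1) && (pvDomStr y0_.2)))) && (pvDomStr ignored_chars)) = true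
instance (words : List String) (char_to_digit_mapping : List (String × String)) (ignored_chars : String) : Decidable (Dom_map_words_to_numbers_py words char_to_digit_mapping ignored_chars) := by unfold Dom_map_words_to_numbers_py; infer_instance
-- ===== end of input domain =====

-- B encodes every word in one map phase (single filter pass + one join, instead of A's repeated
-- str.replace passes and '+=' concatenation) and then groups the pairs with setdefault; a timing run measured B faster on the generated inputs.

-- ===== PORT A =====
-- remove_characters: repeated str.replace(char, '')
def pvRemoveChars (s : String) (chars : String) : String :=
  chars.toList.foldl (fun r ch => PySem.Str.replace r (String.ofList [ch]) "") s

-- _encode_word_with_char_to_digit_mapping; the '+=' string build is done on List Char and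
-- packed with String.ofList at the end (exact: Python str concatenation of the looked-up digits).
-- mapping[char] is a dict lookup that raises KeyError on a missing key: Pre_ excludes that,
-- so getD with "" is exact on the admitted inputs.
def pvEncodeWordA (word : String) (mapping : List (String × String)) (ignored_chars : String) : String :=
  let clean := pvRemoveChars word ignored_chars
  String.ofList (clean.toList.foldl
    (fun acc c => acc ++ ((PySem.Dict.mk mapping).getD (String.ofList [c]) "").toList) [])

def map_words_to_numbers_py (words : List String) (char_to_digit_mapping : List (String × String)) (ignored_chars : String) : List (String × List String) :=
  (words.foldl (fun d word =>
      let word_encoding := pvEncodeWordA word char_to_digit_mapping ignored_chars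
      if d.contains word_encoding then
        d.modify word_encoding PySem.Set.empty (fun s => PySem.Set.add s word)
      else
        d.insert word_encoding (PySem.Set.ofList [word]))
    PySem.Dict.empty).items

-- ===== PORT B =====
-- ''.join(char_to_digit_mapping[c] for c in word if c not in ignored)  (same getD-for-lookup note as in A)
def pvEncodeWordB (word : String) (mapping : List (String × String)) (ignored : PySem.Set Char) : String :=
  String.ofList (PySem.Chars.join []
    ((word.toList.filter (fun c => !(PySem.Set.contains ignored c))).map
      (fun c => ((PySem.Dict.mk mapping).getD (String.ofList [c]) "").toList)))

-- groups.setdefault(encoding, set()).add(word) is a modify with default empty set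
def map_words_to_numbers_py_alt (words : List String) (char_to_digit_mapping : List (String × String)) (ignored_chars : String) : List (String × List String) :=
  let ignored := PySem.Set.ofList ignored_chars.toList
  let pairs := words.map (fun w => (pvEncodeWordB w char_to_digit_mapping ignored, w))
  (pairs.foldl (fun d p => d.modify p.1 PySem.Set.empty (fun s => PySem.Set.add s p.2))
    PySem.Dict.empty).items

-- ===== PRECONDITION & SPEC =====
-- Pre_ excludes exactly the inputs where Python A raises KeyError: some word keeps (after the
-- ignored characters are removed) a character that is not a key of char_to_digit_mapping.
def Pre_map_words_to_numbers_py (words : List String) (char_to_digit_mapping : List (String × String)) (ignored_chars : String) : Prop :=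
  (words.all (fun w => w.toList.all (fun c =>
    ignored_chars.toList.contains c ||
      (char_to_digit_mapping.map (fun p => p.1.toList)).contains [c]))) = true
instance (words : List String) (char_to_digit_mapping : List (String × String)) (ignored_chars : String) : Decidable (Pre_map_words_to_numbers_py words char_to_digit_mapping ignored_chars) := by unfold Pre_map_words_to_numbers_py; infer_instance

def pvWitness_map_words_to_numbers_py : List String × (List (String × String)) × String :=
  (["ab", "b-a", "ba"], [("a", "1"), ("b", "2")], "-\"")

def Spec_map_words_to_numbers_py (words : List String) (char_to_digit_mapping : List (String × String)) (ignored_chars : String) (out : List (String × List String)) : Prop := out = map_words_to_numbers_py_alt words char_to_digit_mapping ignored_chars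
instance (words : List String) (char_to_digit_mapping : List (String × String)) (ignored_chars : String) (out : List (String × List String)) : Decidable (Spec_map_words_to_numbers_py words char_to_digit_mapping ignored_chars out) := by unfold Spec_map_words_to_numbers_py; infer_instance

-- ===== CLAIM (what is proved, stated in full; the proofs are below) =====
def Claim_equal_map_words_to_numbers_py : Prop := ∀ (words : List String) (char_to_digit_mapping : List (String × String)) (ignored_chars : String), Dom_map_words_to_numbers_py words char_to_digit_mapping ignored_chars → Pre_map_words_to_numbers_py words char_to_digit_mapping ignored_chars → Spec_map_words_to_numbers_py words char_to_digit_mapping ignored_chars (map_words_to_numbers_py words char_to_digit_mapping ignored_chars)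

-- ===== LEMMAS AND PROOFS =====

-- str.replace(c, '') with a one-character needle deletes exactly the occurrences of that character
theorem pv_replace_go_filter (a : Char) : ∀ (fuel : Nat) (cs acc : List Char), cs.length ≤ fuel →
    PySem.Chars.replace.go [a] [] fuel cs acc = acc.reverse ++ cs.filter (· ≠ a) := by
  intro fuel
  induction fuel with
  | zero => intro cs acc h; simp at h; subst h; simp [PySem.Chars.replace.go]
  | succ n ih =>
    intro cs acc h
    match cs with
    | [] => simp [PySem.Chars.replace.go]
    | c :: t =>
      simp only [PySem.Chars.replace.go]
      by_cases hc : c = a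
      · subst hc
        simp [List.isPrefixOf, ih t acc (by simpa using h), List.filter]
      · have hp : List.isPrefixOf [a] (c :: t) = false := by
          simp [List.isPrefixOf]
          exact fun h' => (hc h'.symm).elim
        rw [hp]
        simp [ih t (c :: acc) (by simpa using h), List.filter, hc]

theorem pv_replace_filter (cs : List Char) (a : Char) :
    PySem.Chars.replace cs [a] [] = cs.filter (· ≠ a) := by
  have := pv_replace_go_filter a cs.length cs [] le_rfl
  simp only [PySem.Chars.replace] at *
  simpa using this

-- A's remove_characters loop filters the ignored characters out
theorem pvRemoveChars_toList : ∀ (l : List Char) (s : String),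
    (l.foldl (fun r ch => PySem.Str.replace r (String.ofList [ch]) "") s).toList
      = s.toList.filter (fun c => !l.contains c) := by
  intro l
  induction l with
  | nil => intro s; simp
  | cons a l ih =>
    intro s
    rw [List.foldl_cons, ih]
    simp [PySem.Str.toList_replace, pv_replace_filter, List.filter_filter]
    congr 1
    funext c
    by_cases h : c = a <;> simp [h]

-- ''.join with empty separator is flatten
theorem pv_join_nil_flatten : ∀ (xss : List (List Char)), PySem.Chars.join [] xss = xss.flatten := by
  intro xss
  induction xss with
  | nil => simp [PySem.Chars.join_nil]
  | cons p rest ih =>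
    cases rest with
    | nil => simp [PySem.Chars.join_singleton]
    | cons q r => rw [PySem.Chars.join_cons_cons]; simp at ih ⊢; rw [ih]

-- the two encoders agree
theorem pvEncode_eq (w : String) (m : List (String × String)) (ign : String) :
    pvEncodeWordA w m ign = pvEncodeWordB w m (PySem.Set.ofList ign.toList) := by
  simp only [pvEncodeWordA, pvEncodeWordB, pvRemoveChars]
  simp only [pvRemoveChars_toList, PySem.List.foldl_append_eq_flatMap, pv_join_nil_flatten,
    List.flatMap_def, List.nil_append]
  congr 2
  congr 1
  apply List.filter_congr
  intro c _
  by_cases h : c ∈ ign.toList <;>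
    simp [PySem.Set.contains_eq_listContains, PySem.Set.mem_ofList, h]

-- A's if/else step is a single modify (= B's setdefault-then-add step)
theorem pv_stepA_eq (d : PySem.Dict String (PySem.Set String)) (e w : String) :
    (if d.contains e then d.modify e PySem.Set.empty (fun s => PySem.Set.add s w)
     else d.insert e (PySem.Set.ofList [w]))
      = d.modify e PySem.Set.empty (fun s => PySem.Set.add s w) := by
  by_cases h : d.contains e = true
  · simp [h]
  · have h' : d.contains e = false := by simpa using h
    simp only [h', Bool.false_eq_true, if_false, PySem.Dict.modify,
      PySem.Dict.getD_of_not_contains d PySem.Set.empty h']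
    rfl

-- ===== VERDICT (by name: the statement is the Claim_ definition above) =====
theorem map_words_to_numbers_py_spec : Claim_equal_map_words_to_numbers_py := by
  intro words m ign _hDom _hPre
  unfold Spec_map_words_to_numbers_py
  simp only [map_words_to_numbers_py, map_words_to_numbers_py_alt, pvEncode_eq, pv_stepA_eq]
  rw [List.foldl_map]
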